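-- pv_equiv track=rewrite | github.com/CelesteR20/PRUEBA-TECNICA | ejercicio.py | encontrar_pares_suma_n
-- ===== SOURCE A (Python) =====
-- def encontrar_pares_suma_n(n):
--     pares = []
--     vistos = set()
--
--     for i in range(1, n):
--         complemento = n - i
--         if complemento > 0 and complemento not in vistos:
--             pares.append((i, complemento))
--             vistos.add(i)
--
--     return pares
-- ===== SOURCE B (Python) =====
-- def encontrar_pares_suma_n(n):
--     return [(i, n - i) for i in range(1, n // 2 + 1)]
-- ===== Notes on version B (the rewrite author's own statement) =====
-- stated objective: simpler
-- what changed: Replaces A's full-range scan with a seen-set dedup by a closed-form comprehension over the first half of the range, with no auxiliary structure.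
import Mathlib
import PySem

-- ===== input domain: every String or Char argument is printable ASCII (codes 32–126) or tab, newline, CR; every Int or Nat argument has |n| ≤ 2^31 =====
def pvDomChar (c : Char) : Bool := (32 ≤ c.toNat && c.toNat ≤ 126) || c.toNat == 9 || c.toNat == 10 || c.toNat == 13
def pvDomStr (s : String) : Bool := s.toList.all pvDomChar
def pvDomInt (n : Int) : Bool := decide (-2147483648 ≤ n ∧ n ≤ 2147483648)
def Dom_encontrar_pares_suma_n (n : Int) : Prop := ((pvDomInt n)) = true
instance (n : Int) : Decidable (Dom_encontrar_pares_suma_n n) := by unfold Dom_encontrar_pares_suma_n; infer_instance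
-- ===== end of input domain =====

-- ===== PORT A =====
def encontrar_pares_suma_n (n : Int) : List (Int × Int) :=
  ((PySem.List.pyRange 1 n 1).foldl
    (fun (st : List (Int × Int) × PySem.Set Int) i =>
      let complemento := n - i
      if complemento > 0 ∧ ¬ PySem.Set.contains st.2 complemento then
        (st.1 ++ [(i, complemento)], PySem.Set.add st.2 i)
      else st)
    ([], PySem.Set.empty)).1

-- ===== PORT B =====
def encontrar_pares_suma_n_alt (n : Int) : List (Int × Int) :=
  (PySem.List.pyRange 1 (PySem.Int.floordiv n 2 + 1) 1).map (fun i => (i, n - i))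

-- ===== PRECONDITION & SPEC =====
def Spec_encontrar_pares_suma_n (n : Int) (out : List (Int × Int)) : Prop := out = encontrar_pares_suma_n_alt n
instance (n : Int) (out : List (Int × Int)) : Decidable (Spec_encontrar_pares_suma_n n out) := by unfold Spec_encontrar_pares_suma_n; infer_instance

-- ===== CLAIM (what is proved, stated in full; the proofs are below) =====
def Claim_equal_encontrar_pares_suma_n : Prop := ∀ (n : Int), Dom_encontrar_pares_suma_n n → Spec_encontrar_pares_suma_n n (encontrar_pares_suma_n n)

-- ===== LEMMAS AND PROOFS =====

-- ===== VERDICT (by name: the statement is the Claim_ definition above) =====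
-- loop invariant: after scanning 1..b-1, pares is the pairs for i in 1..min(b,h+1)-1
-- and vistos is exactly those i's, where h = n // 2.
theorem pares_loop_inv (n b : Int) (hb : b ≤ n) :
    (PySem.List.pyRange 1 b 1).foldl
      (fun (st : List (Int × Int) × PySem.Set Int) i =>
        let complemento := n - i
        if complemento > 0 ∧ ¬ PySem.Set.contains st.2 complemento then
          (st.1 ++ [(i, complemento)], PySem.Set.add st.2 i)
        else st)
      ([], PySem.Set.empty)
    = ((PySem.List.pyRange 1 (min b (PySem.Int.floordiv n 2 + 1)) 1).map (fun i => (i, n - i)),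
       PySem.List.pyRange 1 (min b (PySem.Int.floordiv n 2 + 1)) 1) := by
  have hfd : PySem.Int.floordiv n 2 = n / 2 := PySem.Int.floordiv_eq_ediv_of_pos (by omega)
  rcases (by omega : b ≤ 1 ∨ 1 < b) with h1 | h1
  · rw [PySem.List.pyRange_one_eq_nil h1,
      PySem.List.pyRange_one_eq_nil (by omega : min b (PySem.Int.floordiv n 2 + 1) ≤ 1)]
    rfl
  · have hk : ∃ k : Nat, b = 1 + (k : Int) := ⟨(b - 1).toNat, by omega⟩
    obtain ⟨k, rfl⟩ := hk
    clear h1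
    induction k with
    | zero =>
      rw [PySem.List.pyRange_one_eq_nil (by omega),
        PySem.List.pyRange_one_eq_nil (by omega : min (1 + (0:Nat) : Int) (PySem.Int.floordiv n 2 + 1) ≤ 1)]
      rfl
    | succ k ih =>
      have hb2 : 1 + (k : Int) + 1 ≤ n := by push_cast at hb; omega
      have hb' : 1 + (k : Int) ≤ n := by omega
      have hstep : (1 + ((k+1 : Nat) : Int)) = (1 + (k : Int)) + 1 := by push_cast; ring
      rw [hstep, PySem.List.pyRange_one_succ_right (by omega), List.foldl_append, ih hb']
      simp only [List.foldl_cons, List.foldl_nil]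
      by_cases hle : (1 + (k : Int)) ≤ n / 2
      · -- i = 1+k ≤ n//2 : the pair is appended and i added to vistos
        have hmin1 : min (1 + (k : Int)) (n / 2 + 1) = 1 + (k : Int) := by omega
        have hmin2 : min ((1 + (k : Int)) + 1) (n / 2 + 1) = (1 + (k : Int)) + 1 := by omega
        rw [hfd, hmin1, hmin2]
        have hnotmem : PySem.Set.contains (PySem.List.pyRange 1 (1 + (k : Int)) 1) (n - (1 + (k : Int))) = false := by
          simp only [PySem.Set.contains, List.contains_eq_mem, decide_eq_false_iff_not,
            PySem.List.mem_pyRange_one]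
          omega
        have hself : PySem.Set.contains (PySem.List.pyRange 1 (1 + (k : Int)) 1) (1 + (k : Int)) = false := by
          simp only [PySem.Set.contains, List.contains_eq_mem, decide_eq_false_iff_not,
            PySem.List.mem_pyRange_one]
          omega
        rw [if_pos ⟨by omega, ne_true_of_eq_false hnotmem⟩]
        simp only [PySem.Set.add, hself, Bool.false_eq_true, if_false]
        rw [PySem.List.pyRange_one_succ_right (by omega : (1:Int) ≤ 1 + (k : Int)), List.map_append]
        rfl
      · -- i = 1+k > n//2 : the complement was already seen, state unchanged
        have hmin1 : min (1 + (k : Int)) (n / 2 + 1) = n / 2 + 1 := by omega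
        have hmin2 : min ((1 + (k : Int)) + 1) (n / 2 + 1) = n / 2 + 1 := by omega
        rw [hfd, hmin1, hmin2]
        have hmem : PySem.Set.contains (PySem.List.pyRange 1 (n / 2 + 1) 1) (n - (1 + (k : Int))) = true := by
          simp only [PySem.Set.contains, List.contains_eq_mem, decide_eq_true_eq,
            PySem.List.mem_pyRange_one]
          omega
        rw [if_neg (fun hcond => hcond.2 hmem)]

theorem encontrar_pares_suma_n_spec : Claim_equal_encontrar_pares_suma_n := by
  intro n _
  unfold Spec_encontrar_pares_suma_n encontrar_pares_suma_n encontrar_pares_suma_n_alt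
  rw [pares_loop_inv n n le_rfl]
  have hfd : PySem.Int.floordiv n 2 = n / 2 := PySem.Int.floordiv_eq_ediv_of_pos (by omega)
  rcases (by omega : 1 ≤ n ∨ n < 1) with hn | hn
  · have : min n (PySem.Int.floordiv n 2 + 1) = PySem.Int.floordiv n 2 + 1 := by rw [hfd]; omega
    rw [this]
  · rw [PySem.List.pyRange_one_eq_nil (by omega : min n (PySem.Int.floordiv n 2 + 1) ≤ 1),
      PySem.List.pyRange_one_eq_nil (by rw [hfd]; omega : PySem.Int.floordiv n 2 + 1 ≤ 1)]
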